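-- pv_equiv track=rewrite | github.com/nickgreenquist/InterviewPrep | CrackingTheCodingInterview/Chapter16-Moderate/Operation.py | negate
-- ===== SOURCE A (Python) =====
-- def negate(a):
--     temp = 0
--     i = 1
--     if a > 0:
--         i = -1
--     while a != 0:
--         a += i
--         temp += i
--     return temp
-- ===== SOURCE B (Python) =====
-- def negate(a):
--     return -a
-- ===== Notes on version B (the rewrite author's own statement) =====
-- stated objective: faster
-- what changed: Replaced the unit-step accumulation loop with the closed-form unary negation -a.
import Mathlib
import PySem

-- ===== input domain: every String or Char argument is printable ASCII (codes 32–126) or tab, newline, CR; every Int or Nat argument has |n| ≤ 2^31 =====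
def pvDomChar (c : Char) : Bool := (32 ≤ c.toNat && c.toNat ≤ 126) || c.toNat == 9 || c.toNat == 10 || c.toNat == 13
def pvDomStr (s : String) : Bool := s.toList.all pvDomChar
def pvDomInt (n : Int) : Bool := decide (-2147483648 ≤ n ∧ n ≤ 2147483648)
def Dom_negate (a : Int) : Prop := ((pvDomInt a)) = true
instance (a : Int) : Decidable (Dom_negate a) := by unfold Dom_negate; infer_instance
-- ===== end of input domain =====

-- B computes the negation in closed form (-a) instead of A's |a|-step unit-addition loop.

-- ===== PORT A =====
-- the while loop of A; the second guard only records that the step i moves a toward 0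
-- (always true at A's call site), making the recursion total.
def negateLoop (a temp i : Int) : Int :=
  if a = 0 then temp
  else if (i = -1 ∧ 0 < a) ∨ (i = 1 ∧ a < 0) then negateLoop (a + i) (temp + i) i
  else temp
termination_by a.natAbs
decreasing_by
  rcases ‹(i = -1 ∧ 0 < a) ∨ (i = 1 ∧ a < 0)› with ⟨hi, ha⟩ | ⟨hi, ha⟩ <;> subst hi <;> omega

def negate (a : Int) : Int :=
  negateLoop a 0 (if a > 0 then -1 else 1)

-- ===== PORT B =====
def negate_alt (a : Int) : Int := -a

-- ===== PRECONDITION & SPEC =====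
def Spec_negate (a : Int) (out : Int) : Prop := out = negate_alt a
instance (a : Int) (out : Int) : Decidable (Spec_negate a out) := by unfold Spec_negate; infer_instance

-- ===== CLAIM (what is proved, stated in full; the proofs are below) =====
def Claim_equal_negate : Prop := ∀ (a : Int), Dom_negate a → Spec_negate a (negate a)

-- ===== LEMMAS AND PROOFS =====
theorem negateLoop_pos (n : Nat) : ∀ temp : Int, negateLoop (n : Int) temp (-1) = temp - n := by
  induction n with
  | zero => intro temp; rw [negateLoop]; simp
  | succ k ih =>
    intro temp
    rw [negateLoop]
    split_ifs with h1 h2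
    · omega
    · have e : ((k + 1 : Nat) : Int) + (-1) = (k : Int) := by push_cast; ring
      rw [e, ih]
      push_cast; ring
    · exact absurd (Or.inl ⟨rfl, by push_cast; omega⟩) h2

theorem negateLoop_neg (n : Nat) : ∀ temp : Int, negateLoop (-(n : Int)) temp 1 = temp + n := by
  induction n with
  | zero => intro temp; rw [negateLoop]; simp
  | succ k ih =>
    intro temp
    rw [negateLoop]
    split_ifs with h1 h2
    · exfalso; push_cast at h1; omega
    · have e : -((k + 1 : Nat) : Int) + 1 = -(k : Int) := by push_cast; ring
      rw [e, ih]
      push_cast; ring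
    · exact absurd (Or.inr ⟨rfl, by push_cast; omega⟩) h2

-- ===== VERDICT (by name: the statement is the Claim_ definition above) =====
theorem negate_spec : Claim_equal_negate := by
  intro a _
  unfold Spec_negate negate negate_alt
  by_cases h : a > 0
  · rw [if_pos h]
    have ha : a = (a.toNat : Int) := by omega
    rw [ha, negateLoop_pos]
    omega
  · rw [if_neg h]
    have ha : a = -((-a).toNat : Int) := by omega
    rw [ha, negateLoop_neg]
    omega
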